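-- pv_equiv track=rewrite | github.com/alfredo-svh/DailyCodingProblem | 231.py | rearr
-- ===== SOURCE A (Python) =====
-- import collections
--
-- def rearr(s):
--     res = ""
--     c = collections.Counter(s)
--
--
--     if c.most_common(1)[0][1] > (len(s)//2) + 1:
--         return None
--
--     while (1):
--         done = True
--         for char, cnt  in c.most_common():
--             if cnt != 0:
--                 res +=char
--                 c[char] -= 1
--                 done = False
--
--         if done == True:
--             break
--
--     return res
-- ===== SOURCE B (Python) =====
-- import collections
--
-- def rearr(s):
--     cnt = collections.Counter(s)
--     if not cnt:
--         return ""
--     order = sorted(cnt, key=lambda ch: cnt[ch], reverse=True)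
--     m = cnt[order[0]]
--     if m > len(s) // 2 + 1:
--         return None
--     # counting-sort histogram: h[c] = how many distinct chars occur exactly c times
--     h = [0] * (m + 1)
--     for ch in cnt:
--         h[cnt[ch]] += 1
--     # offs[p] = output index where the p-th "layer" starts; k = chars still alive in layer p
--     offs = [0] * m
--     start, k = 0, len(order)
--     for p in range(m):
--         k -= h[p]
--         offs[p] = start
--         start += k
--     # char-major placement: the r-th char of `order` occupies slot offs[p] + r in every layer p < cnt[ch]
--     res = [''] * len(s)
--     for r, ch in enumerate(order):
--         for p in range(cnt[ch]):
--             res[offs[p] + r] = ch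
--     return ''.join(res)
-- ===== Notes on version B (the rewrite author's own statement) =====
-- stated objective: faster
-- what changed: B is char-major: it counts once, sorts the distinct chars once, derives each round's start offset from a counting-sort histogram of the counts, and writes every character's copies directly into a preallocated result array at positions offs[p]+rank, instead of A's while-loop that re-sorts the whole counter with most_common() every round, scans it, decrements counts and grows the result by string concatenation.
-- outside the precondition, e.g. on rearr(''): A raises IndexError, B returns ''
import Mathlib
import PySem

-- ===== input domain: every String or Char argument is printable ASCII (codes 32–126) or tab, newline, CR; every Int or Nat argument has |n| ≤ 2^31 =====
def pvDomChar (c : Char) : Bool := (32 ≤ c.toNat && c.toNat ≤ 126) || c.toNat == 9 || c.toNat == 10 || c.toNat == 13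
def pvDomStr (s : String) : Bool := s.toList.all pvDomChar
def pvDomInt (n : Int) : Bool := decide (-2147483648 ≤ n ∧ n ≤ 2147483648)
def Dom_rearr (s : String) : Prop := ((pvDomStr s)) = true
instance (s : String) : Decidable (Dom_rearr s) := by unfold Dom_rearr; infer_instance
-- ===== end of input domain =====

-- B replaces A's repeated most_common() passes by counting-sort offsets and char-major placement:
-- each character's copies are written directly at their computed output positions; objective: faster.

-- ===== PORT A =====
-- one body of A's 'while' loop: 'for char, cnt in c.most_common(): …' with state (c, res, done)
def rearrPass (c : PySem.Dict Char Int) (res : List Char) :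
    PySem.Dict Char Int × List Char × Bool :=
  (PySem.List.sorted c.items (fun kv => kv.2) true).foldl
    (fun st kv => if kv.2 ≠ 0 then (st.1.modify kv.1 0 (· - 1), st.2.1 ++ [kv.1], false) else st)
    (c, res, true)

-- A's 'while (1)' loop; fuel only makes it total (it runs at most maxcount+1 ≤ len(s)+1 passes)
def rearrLoop : Nat → PySem.Dict Char Int → List Char → List Char
  | 0, _, res => res
  | fuel+1, c, res =>
      let st := rearrPass c res
      if st.2.2 then st.2.1 else rearrLoop fuel st.1 st.2.1

-- c.most_common() = sorted(c.items(), key=count, reverse=True); most_common(1)[0] is its head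
-- (nlargest(1) and the sort head can differ only in the CHAR on ties; A reads only the count [0][1])
def rearr (s : String) : Option String :=
  let c := PySem.Dict.counter s.toList
  match PySem.List.pyGet? (PySem.List.sorted c.items (fun kv => kv.2) true) 0 with
  | none => none  -- IndexError on the empty counter: excluded by Pre_rearr
  | some kv0 =>
    if kv0.2 > PySem.Int.floordiv (s.toList.length : Int) 2 + 1 then none
    else some (String.ofList (rearrLoop (s.toList.length + 1) c []))

-- ===== PORT B =====
-- h = [0]*(m+1); for ch in cnt: h[cnt[ch]] += 1   ('[0]*(m+1)' with m ≥ 1: toNat exact;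
-- indices cnt[ch] ∈ [1,m] are always in range, so pySetD/pyGetD are exact here)
def altHist (cnt : PySem.Dict Char Int) (m : Int) : List Int :=
  cnt.keys.foldl
    (fun h ch => PySem.List.pySetD h (cnt.getD ch 0) (PySem.List.pyGetD h (cnt.getD ch 0) 0 + 1))
    (List.replicate (m.toNat + 1) (0 : Int))

-- offs = [0]*m; start, k = 0, len(order); for p in range(m): k -= h[p]; offs[p] = start; start += k
-- (state = (offs, start, k); indices p ∈ [0,m) are in range)
def altOffs (h : List Int) (m : Int) (k0 : Int) : List Int × Int × Int :=
  (PySem.List.pyRange 0 m 1).foldl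
    (fun (st : List Int × Int × Int) p =>
      let k := st.2.2 - PySem.List.pyGetD h p 0
      (PySem.List.pySetD st.1 p st.2.1, st.2.1 + k, k))
    (List.replicate m.toNat (0 : Int), 0, k0)

-- res = ['']*len(s); for r,ch in enumerate(order): for p in range(cnt[ch]): res[offs[p]+r] = ch
-- (cells modelled as List Char: '' = [], ch = [ch], so ''.join(res) = res.flatten; writes in range)
def altWrites (cnt : PySem.Dict Char Int) (offs : List Int) (order : List Char) (n : Nat) :
    List (List Char) :=
  (PySem.List.enumerate order).foldl
    (fun res rch =>
      (PySem.List.pyRange 0 (cnt.getD rch.2 0) 1).foldl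
        (fun res p => PySem.List.pySetD res (PySem.List.pyGetD offs p 0 + rch.1) [rch.2])
        res)
    (List.replicate n ([] : List Char))

def rearr_alt (s : String) : Option String :=
  let cnt := PySem.Dict.counter s.toList
  if cnt.items.isEmpty then some (String.ofList [])
  else
    let order := PySem.List.sorted cnt.keys (fun ch => cnt.getD ch 0) true
    match PySem.List.pyGet? order 0 with
    | none => none  -- unreachable totality guard: cnt is nonempty here, so order has a head
    | some ch0 =>
      let m := cnt.getD ch0 0
      if m > PySem.Int.floordiv (s.toList.length : Int) 2 + 1 then none
      else
        let h := altHist cnt m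
        let offs := (altOffs h m (order.length : Int)).1
        let res := altWrites cnt offs order s.toList.length
        some (String.ofList res.flatten)

-- ===== PRECONDITION & SPEC =====
-- Pre_ excludes only the empty string, on which A raises IndexError (most_common(1)[0] of an empty counter)
def Pre_rearr (s : String) : Prop := s ≠ ""
instance (s : String) : Decidable (Pre_rearr s) := by unfold Pre_rearr; infer_instance
def pvWitness_rearr : String := "aab"

def Spec_rearr (s : String) (out : Option String) : Prop := out = rearr_alt s
instance (s : String) (out : Option String) : Decidable (Spec_rearr s out) := by unfold Spec_rearr; infer_instance

-- ===== CLAIM (what is proved, stated in full; the proofs are below) =====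
def Claim_equal_rearr : Prop := ∀ (s : String), Dom_rearr s → Pre_rearr s → Spec_rearr s (rearr s)

-- ===== LEMMAS AND PROOFS =====

theorem insertBy_congr {α : Type} (f g : α → α → Bool) (x : α) (acc : List α)
    (h : ∀ y ∈ acc, f x y = g x y) :
    PySem.List.insertBy f x acc = PySem.List.insertBy g x acc := by
  induction acc with
  | nil => rfl
  | cons y ys ih =>
    simp only [PySem.List.insertBy]
    rw [h y (by simp)]
    by_cases hg : g x y = true
    · simp [hg]
    · simp only [Bool.not_eq_true] at hg
      simp [hg, ih (fun z hz => h z (by simp [hz]))]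

theorem foldl_insertBy_congr {α : Type} (f g : α → α → Bool) (l : List α) :
    ∀ (xs acc : List α), (∀ x ∈ xs, x ∈ l) → (∀ x ∈ acc, x ∈ l) →
    (∀ a ∈ l, ∀ b ∈ l, f a b = g a b) →
    xs.foldl (fun acc x => PySem.List.insertBy f x acc) acc
      = xs.foldl (fun acc x => PySem.List.insertBy g x acc) acc := by
  intro xs
  induction xs with
  | nil => intro acc _ _ _; rfl
  | cons x xs ih =>
    intro acc hxs hacc hfg
    simp only [List.foldl_cons]
    have hx : x ∈ l := hxs x (by simp)
    rw [insertBy_congr f g x acc (fun y hy => hfg x hx y (hacc y hy))]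
    exact ih _ (fun z hz => hxs z (by simp [hz]))
      (fun z hz => by
        rcases (PySem.List.mem_insertBy _ _ _ _).1 hz with h | h
        · exact h ▸ hx
        · exact hacc z h)
      hfg

theorem sorted_rev_congr {α : Type} (xs : List α) (k1 k2 : α → Int)
    (h : ∀ a ∈ xs, ∀ b ∈ xs, (k1 a < k1 b ↔ k2 a < k2 b)) :
    PySem.List.sorted xs k1 true = PySem.List.sorted xs k2 true := by
  show xs.foldl (fun acc x => PySem.List.insertBy (fun a b => decide (k1 b < k1 a)) x acc) []
      = xs.foldl (fun acc x => PySem.List.insertBy (fun a b => decide (k2 b < k2 a)) x acc) []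
  exact foldl_insertBy_congr _ _ xs xs [] (fun _ hx => hx) (by simp)
    (fun a ha b hb => by simp only [decide_eq_decide]; exact h b hb a ha)

theorem insertBy_map {α β : Type} (f : β → β → Bool) (g : α → β) (x : α) :
    ∀ (ys : List α),
    PySem.List.insertBy f (g x) (ys.map g)
      = (PySem.List.insertBy (fun a b => f (g a) (g b)) x ys).map g := by
  intro ys
  induction ys with
  | nil => rfl
  | cons y ys ih =>
    simp only [List.map_cons, PySem.List.insertBy]
    by_cases h : f (g x) (g y) = true
    · simp [h]
    · simp only [Bool.not_eq_true] at h
      simp [h, ih]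

theorem foldl_insertBy_map {α β : Type} (f : β → β → Bool) (g : α → β) :
    ∀ (xs zs : List α),
    (xs.map g).foldl (fun acc x => PySem.List.insertBy f x acc) (zs.map g)
      = (xs.foldl (fun acc x => PySem.List.insertBy (fun a b => f (g a) (g b)) x acc) zs).map g := by
  intro xs
  induction xs with
  | nil => intro zs; rfl
  | cons x xs ih =>
    intro zs
    simp only [List.map_cons, List.foldl_cons]
    rw [insertBy_map f g x zs]
    exact ih _

theorem sorted_rev_map {α β : Type} (xs : List α) (g : α → β) (k : β → Int) :
    PySem.List.sorted (xs.map g) k true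
      = (PySem.List.sorted xs (fun x => k (g x)) true).map g := by
  show (xs.map g).foldl (fun acc x => PySem.List.insertBy (fun a b => decide (k b < k a)) x acc) (([] : List α).map g)
      = (xs.foldl (fun acc x => PySem.List.insertBy (fun a b => decide (k (g b) < k (g a))) x acc) []).map g
  exact foldl_insertBy_map _ g xs []

def Stacked {α : Type} (q : α → Bool) (l : List α) : Prop :=
  l.Pairwise (fun a b => q b = true → q a = true)

theorem insertBy_filter_pos {α : Type} (f : α → α → Bool) (q : α → Bool) (x : α)
    (hx : q x = true) :
    ∀ (acc : List α), Stacked q acc → (∀ y ∈ acc, q y = false → f x y = true) →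
    (PySem.List.insertBy f x acc).filter q = PySem.List.insertBy f x (acc.filter q) := by
  intro acc
  induction acc with
  | nil => intro _ _; simp [PySem.List.insertBy, hx]
  | cons y ys ih =>
    intro hst hf
    rw [Stacked, List.pairwise_cons] at hst
    simp only [PySem.List.insertBy]
    by_cases hfy : f x y = true
    · rw [if_pos hfy]
      by_cases hqy : q y = true
      · simp only [List.filter_cons, hx, hqy, if_pos]
        simp [PySem.List.insertBy, hfy, hx, hqy]
      · -- y fails q: everything after y fails q too, so filter of ys is []
        simp only [Bool.not_eq_true] at hqy
        have hys : ∀ z ∈ ys, q z = false := fun z hz => by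
          by_contra hc
          simp only [Bool.not_eq_false] at hc
          exact absurd (hst.1 z hz hc) (by simp [hqy])
        have h1 : List.filter q ys = [] := List.filter_eq_nil_iff.2 (by
          intro z hz; simp [hys z hz])
        simp [List.filter_cons, hx, hqy, h1, PySem.List.insertBy]
    · simp only [Bool.not_eq_true] at hfy
      rw [if_neg (by simp [hfy])]
      have hqy : q y = true := by
        by_contra hc
        simp only [Bool.not_eq_true] at hc
        exact absurd (hf y (by simp) hc) (by simp [hfy])
      have ihh := ih hst.2 (fun z hz hqz => hf z (by simp [hz]) hqz)
      simp only [List.filter_cons, hqy, if_pos, PySem.List.insertBy, hfy]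
      simp [ihh, hqy]

theorem insertBy_filter_neg {α : Type} (f : α → α → Bool) (q : α → Bool) (x : α)
    (hx : q x = false) :
    ∀ (acc : List α), (∀ y ∈ acc, q y = true → f x y = false) →
    (PySem.List.insertBy f x acc).filter q = acc.filter q := by
  intro acc
  induction acc with
  | nil => intro _; simp [PySem.List.insertBy, hx]
  | cons y ys ih =>
    intro hf
    simp only [PySem.List.insertBy]
    by_cases hfy : f x y = true
    · have hqy : q y = false := by
        by_contra hc
        simp only [Bool.not_eq_false] at hc
        exact absurd (hf y (by simp) hc) (by simp [hfy])
      rw [if_pos hfy]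
      show List.filter q (x :: y :: ys) = List.filter q (y :: ys)
      simp [List.filter_cons, hx, hqy]
    · simp only [Bool.not_eq_true] at hfy
      have hni : ¬ (f x y = true) := by simp [hfy]
      rw [if_neg hni]
      show List.filter q (y :: PySem.List.insertBy f x ys) = List.filter q (y :: ys)
      simp [List.filter_cons, ih (fun z hz hqz => hf z (by simp [hz]) hqz)]

theorem insertBy_stacked {α : Type} (f : α → α → Bool) (q : α → Bool) (x : α)
    (P1 : ∀ a b, q a = true → q b = false → f a b = true)
    (P2 : ∀ a b, q a = false → q b = true → f a b = false) :
    ∀ (acc : List α), Stacked q acc → Stacked q (PySem.List.insertBy f x acc) := by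
  intro acc
  induction acc with
  | nil => intro _; simp [PySem.List.insertBy, Stacked]
  | cons y ys ih =>
    intro hst
    rw [Stacked, List.pairwise_cons] at hst
    simp only [PySem.List.insertBy]
    by_cases hfy : f x y = true
    · rw [if_pos hfy]
      rw [Stacked, List.pairwise_cons]
      constructor
      · intro z hz hqz
        by_contra hqx
        simp only [Bool.not_eq_true] at hqx
        have hqy : q y = false := by
          by_contra hc
          simp only [Bool.not_eq_false] at hc
          exact absurd (P2 x y hqx hc) (by simp [hfy])
        rcases List.mem_cons.1 hz with rfl | hz'
        · simp_all
        · exact absurd (hst.1 z hz' hqz) (by simp [hqy])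
      · exact List.pairwise_cons.2 hst
    · rw [if_neg hfy]
      rw [Stacked, List.pairwise_cons]
      constructor
      · intro z hz hqz
        rcases (PySem.List.mem_insertBy _ _ _ _).1 hz with rfl | hz'
        · by_contra hqy
          simp only [Bool.not_eq_true] at hqy
          exact absurd (P1 z y hqz hqy) (by simp [hfy])
        · exact hst.1 z hz' hqz
      · exact ih hst.2

theorem foldl_insertBy_filter {α : Type} (f : α → α → Bool) (q : α → Bool)
    (P1 : ∀ a b, q a = true → q b = false → f a b = true)
    (P2 : ∀ a b, q a = false → q b = true → f a b = false) :
    ∀ (xs acc : List α), Stacked q acc →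
    (xs.foldl (fun acc x => PySem.List.insertBy f x acc) acc).filter q
      = (xs.filter q).foldl (fun acc x => PySem.List.insertBy f x acc) (acc.filter q) := by
  intro xs
  induction xs with
  | nil => intro acc _; rfl
  | cons x xs ih =>
    intro acc hst
    simp only [List.foldl_cons, List.filter_cons]
    by_cases hqx : q x = true
    · rw [if_pos hqx]
      rw [ih _ (insertBy_stacked f q x P1 P2 acc hst)]
      rw [insertBy_filter_pos f q x hqx acc hst (fun y hy hqy => P1 x y hqx hqy)]
      rfl
    · simp only [Bool.not_eq_true] at hqx
      rw [if_neg (by simp [hqx])]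
      rw [ih _ (insertBy_stacked f q x P1 P2 acc hst)]
      rw [insertBy_filter_neg f q x hqx acc (fun y hy hqy => P2 x y hqx hqy)]

theorem sorted_rev_filter {α : Type} (xs : List α) (k : α → Int) (q : α → Bool)
    (H : ∀ a b, q a = true → q b = false → k b < k a) :
    (PySem.List.sorted xs k true).filter q = PySem.List.sorted (xs.filter q) k true := by
  show (xs.foldl (fun acc x => PySem.List.insertBy (fun a b => decide (k b < k a)) x acc) []).filter q
      = (xs.filter q).foldl (fun acc x => PySem.List.insertBy (fun a b => decide (k b < k a)) x acc) []
  rw [foldl_insertBy_filter _ q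
    (fun a b ha hb => by simp [H a b ha hb])
    (fun a b ha hb => by simp [not_lt.2 (le_of_lt (H b a hb ha))])
    xs [] (by simp [Stacked])]
  rfl

def passDictStep (d : PySem.Dict Char Int) (kv : Char × Int) : PySem.Dict Char Int :=
  if kv.2 ≠ 0 then d.modify kv.1 0 (· - 1) else d

theorem passDict_getD (mc : List (Char × Int)) :
    ∀ (d : PySem.Dict Char Int) (ch : Char), (mc.map Prod.fst).Nodup →
    (∀ kv ∈ mc, d.getD kv.1 0 = kv.2) →
    (mc.foldl passDictStep d).getD ch 0
      = if mc.any (fun kv => kv.1 == ch && kv.2 != 0) then d.getD ch 0 - 1 else d.getD ch 0 := by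
  induction mc with
  | nil => intro d ch _ _; simp
  | cons kv rest ih =>
    intro d ch hnd hval
    simp only [List.map_cons, List.nodup_cons] at hnd
    have hrest : ∀ e ∈ rest, (passDictStep d kv).getD e.1 0 = e.2 := by
      intro e he
      have hne : e.1 ≠ kv.1 := fun h => hnd.1 (h ▸ List.mem_map_of_mem he)
      unfold passDictStep
      split
      · rw [PySem.Dict.getD_modify_of_ne _ _ _ hne]
        exact hval e (by simp [he])
      · exact hval e (by simp [he])
    simp only [List.foldl_cons, List.any_cons]
    rw [ih (passDictStep d kv) ch hnd.2 hrest]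
    by_cases hck : kv.1 = ch
    · subst hck
      have hnotin : rest.any (fun e => e.1 == kv.1 && e.2 != 0) = false := by
        simp only [List.any_eq_false]
        intro e he
        by_cases h : e.1 = kv.1
        · exact absurd (h ▸ (List.mem_map_of_mem (f := Prod.fst) he)) hnd.1
        · simp [h]
      simp only [hnotin]
      by_cases hz : kv.2 = 0
      · have hps : passDictStep d kv = d := by simp [passDictStep, hz]
        simp [hps, hz]
      · have hps : passDictStep d kv = d.modify kv.1 0 (· - 1) := by
          simp [passDictStep, hz]
        rw [hps, PySem.Dict.getD_modify_self]
        simp [hz]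
    · have h1 : (kv.1 == ch) = false := by simp [fun h : kv.1 = ch => hck h]
      simp only [h1, Bool.false_and, Bool.false_or]
      have h2 : (passDictStep d kv).getD ch 0 = d.getD ch 0 := by
        unfold passDictStep
        split
        · exact PySem.Dict.getD_modify_of_ne _ _ _ (fun h => hck h.symm)
        · rfl
      rw [h2]

theorem passDict_keys (mc : List (Char × Int)) :
    ∀ (d : PySem.Dict Char Int), (∀ kv ∈ mc, d.contains kv.1 = true) →
    (mc.foldl passDictStep d).keys = d.keys := by
  induction mc with
  | nil => intro d _; rfl
  | cons kv rest ih =>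
    intro d hc
    simp only [List.foldl_cons]
    have hk : (passDictStep d kv).keys = d.keys := by
      unfold passDictStep
      split
      · rw [PySem.Dict.keys_modify]
        exact PySem.Dict.keys_insert_of_contains _ _ (hc kv (by simp))
      · rfl
    have hc' : ∀ e ∈ rest, (passDictStep d kv).contains e.1 = true := by
      intro e he
      unfold passDictStep
      split
      · rw [PySem.Dict.contains_modify]
        simp [hc e (by simp [he])]
      · exact hc e (by simp [he])
    rw [ih (passDictStep d kv) hc', hk]

theorem pass_split (mc : List (Char × Int)) :
    ∀ (d : PySem.Dict Char Int) (res : List Char) (b : Bool),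
    mc.foldl
      (fun st kv => if kv.2 ≠ 0 then (st.1.modify kv.1 0 (· - 1), st.2.1 ++ [kv.1], false) else st)
      (d, res, b)
    = (mc.foldl passDictStep d,
       res ++ (mc.filter (fun kv => kv.2 ≠ 0)).map Prod.fst,
       b && !(mc.any (fun kv => kv.2 != 0))) := by
  induction mc with
  | nil => intro d res b; simp
  | cons kv rest ih =>
    intro d res b
    simp only [List.foldl_cons, List.filter_cons, List.any_cons]
    by_cases hz : kv.2 = 0
    · have hb : (kv.2 != 0) = false := by simp [hz]
      simp only [hz, ne_eq, not_true_eq_false, if_false, hb, Bool.false_or,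
        decide_false]
      have : passDictStep d kv = d := by simp [passDictStep, hz]
      rw [this]
      exact ih d res b
    · have hb : (kv.2 != 0) = true := by simp [hz]
      simp only [ne_eq, hz, not_false_eq_true, if_pos, hb, Bool.true_or, decide_true]
      have h1 : passDictStep d kv = d.modify kv.1 0 (· - 1) := by simp [passDictStep, hz]
      rw [ih _ _ _, h1]
      simp

def cntF (t : List Char) (ch : Char) : Int := (t.count ch : Int)
def keysF (t : List Char) : List Char := PySem.Set.ofList t
def DpF (t : List Char) (p : Int) : PySem.Dict Char Int :=
  ⟨(keysF t).map (fun ch => (ch, max (cntF t ch - p) 0))⟩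
def orderF (t : List Char) : List Char := PySem.List.sorted (keysF t) (cntF t) true
def emitF (t : List Char) (p : Int) : List Char :=
  (orderF t).filter (fun ch => decide (p < cntF t ch))

theorem cntF_nonneg (t : List Char) (ch : Char) : 0 ≤ cntF t ch := Int.natCast_nonneg _

theorem keysF_nodup (t : List Char) : (keysF t).Nodup := PySem.Set.nodup_ofList t

theorem DpF_items (t : List Char) (p : Int) :
    (DpF t p).items = (keysF t).map (fun ch => (ch, max (cntF t ch - p) 0)) := rfl

theorem DpF_keys (t : List Char) (p : Int) : (DpF t p).keys = keysF t := by
  show ((keysF t).map (fun ch => (ch, max (cntF t ch - p) 0))).map Prod.fst = keysF t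
  have h : (Prod.fst ∘ fun ch => (ch, max (cntF t ch - p) 0)) = id := by funext ch; rfl
  rw [List.map_map, h, List.map_id]

theorem DpF_getD (t : List Char) (p : Int) (ch : Char) (hch : ch ∈ keysF t) :
    (DpF t p).getD ch 0 = max (cntF t ch - p) 0 := by
  have hmem : (ch, max (cntF t ch - p) 0) ∈ (DpF t p).items := by
    rw [DpF_items]; exact List.mem_map_of_mem hch
  exact PySem.Dict.getD_of_mem_items _ hmem (by rw [DpF_keys]; exact keysF_nodup t) 0

theorem pass_eq (t : List Char) (p : Int) (hp : 0 ≤ p) (res : List Char) :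
    rearrPass (DpF t p) res
      = (DpF t (p+1), res ++ emitF t p,
         !((keysF t).any (fun ch => decide (p < cntF t ch)))) := by
  have hK := keysF_nodup t
  set K := keysF t with hKdef
  set kp : Char → Int := fun ch => max (cntF t ch - p) 0 with hkp
  set g : Char → Char × Int := fun ch => (ch, kp ch) with hg
  have hkpv : ∀ ch, kp ch = max (cntF t ch - p) 0 := fun _ => rfl
  have hgv : ∀ ch, g ch = (ch, kp ch) := fun _ => rfl
  have hitems : (DpF t p).items = K.map g := rfl
  have hsorted : PySem.List.sorted (DpF t p).items (fun kv => kv.2) true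
      = (PySem.List.sorted K kp true).map g := by
    rw [hitems, sorted_rev_map]
  set mc := PySem.List.sorted (DpF t p).items (fun kv => kv.2) true with hmc
  unfold rearrPass
  rw [← hmc, pass_split]
  have hmcmem : ∀ kv ∈ mc, kv ∈ (DpF t p).items := by
    intro kv hkv; exact (PySem.List.mem_sorted _ _ _ _).1 hkv
  have hDkeysnd : (DpF t p).keys.Nodup := by rw [DpF_keys]; exact hK
  have hdict : mc.foldl passDictStep (DpF t p) = DpF t (p+1) := by
    have hmcfst : mc.map Prod.fst = PySem.List.sorted K kp true := by
      rw [hsorted, List.map_map]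
      have h : (Prod.fst ∘ g) = id := by funext ch; rfl
      rw [h, List.map_id]
    have hmcnd : (mc.map Prod.fst).Nodup := by
      rw [hmcfst]
      exact ((PySem.List.sorted_perm K kp true).nodup_iff).2 hK
    have hval : ∀ kv ∈ mc, (DpF t p).getD kv.1 0 = kv.2 := by
      intro kv hkv
      exact PySem.Dict.getD_of_mem_items _ (hmcmem kv hkv) hDkeysnd 0
    have hcont : ∀ kv ∈ mc, (DpF t p).contains kv.1 = true := by
      intro kv hkv
      rw [PySem.Dict.contains_iff_mem_keys, DpF_keys]
      have := hmcmem kv hkv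
      rw [hitems] at this
      rcases List.mem_map.1 this with ⟨ch, hch, hkveq⟩
      rw [← hkveq]
      exact hch
    apply PySem.Dict.ext
    have hkeys : (mc.foldl passDictStep (DpF t p)).keys = K := by
      rw [passDict_keys mc _ hcont, DpF_keys]
    have hnd' : (mc.foldl passDictStep (DpF t p)).keys.Nodup := by rw [hkeys]; exact hK
    rw [PySem.Dict.items_eq_map_keys _ hnd' 0, hkeys, DpF_items]
    apply List.map_congr_left
    intro ch hch
    rw [passDict_getD mc _ ch hmcnd hval, DpF_getD t p ch hch]
    have hiff : (mc.any fun kv => kv.1 == ch && kv.2 != 0) = true ↔ kp ch ≠ 0 := by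
      constructor
      · intro h
        rcases List.any_eq_true.1 h with ⟨kv, hkv, hcond⟩
        have : kv ∈ K.map g := by rw [← hitems]; exact hmcmem kv hkv
        rcases List.mem_map.1 this with ⟨ch', _, hkveq⟩
        simp only [Bool.and_eq_true] at hcond
        rcases hcond with ⟨hbeq, hbne⟩
        have hch' : kv.1 = ch := by exact beq_iff_eq.1 hbeq
        have : kv.2 = kp ch := by
          rw [← hkveq] at hch' ⊢
          simp only [hgv] at hch' ⊢
          rw [hch']
        rw [this] at hbne
        simpa using hbne
      · intro h
        apply List.any_eq_true.2
        refine ⟨(ch, kp ch), ?_, ?_⟩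
        · rw [hmc, PySem.List.mem_sorted, hitems]
          exact List.mem_map_of_mem hch
        · simp [h]
    have hc0 : 0 ≤ cntF t ch := cntF_nonneg t ch
    by_cases hz : kp ch = 0
    · rw [if_neg (by rw [hiff]; simp [hz])]
      rw [hkpv] at hz
      simp only [Prod.mk.injEq, true_and]
      omega
    · rw [if_pos (hiff.2 hz)]
      rw [hkpv] at hz
      simp only [Prod.mk.injEq, true_and]
      omega
  have hemit : (mc.filter (fun kv => kv.2 ≠ 0)).map Prod.fst = emitF t p := by
    rw [hsorted]
    rw [List.filter_map, List.map_map]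
    have hfst : (Prod.fst ∘ g) = id := by funext ch; simp [hgv]
    rw [hfst, List.map_id]
    have hq : ((fun (kv : Char × Int) => decide (kv.2 ≠ 0)) ∘ g)
        = fun ch => decide (p < cntF t ch) := by
      funext ch
      simp only [Function.comp, hgv, decide_eq_decide]
      have := cntF_nonneg t ch
      simp only [hkpv]
      omega
    rw [hq]
    have hE1 : (PySem.List.sorted K kp true).filter (fun ch => decide (p < cntF t ch))
        = PySem.List.sorted (K.filter (fun ch => decide (p < cntF t ch))) kp true := by
      apply sorted_rev_filter
      intro a b ha hb
      have ha' : p < cntF t a := of_decide_eq_true ha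
      have hb' : ¬ p < cntF t b := of_decide_eq_false hb
      have := cntF_nonneg t a
      have := cntF_nonneg t b
      simp only [hkpv]
      omega
    have hE2 : PySem.List.sorted (K.filter (fun ch => decide (p < cntF t ch))) kp true
        = PySem.List.sorted (K.filter (fun ch => decide (p < cntF t ch))) (cntF t) true := by
      apply sorted_rev_congr
      intro a ha b hb
      have ha' : p < cntF t a := of_decide_eq_true (List.mem_filter.1 ha).2
      have hb' : p < cntF t b := of_decide_eq_true (List.mem_filter.1 hb).2
      simp only [hkpv]
      omega
    have hE3 : PySem.List.sorted (K.filter (fun ch => decide (p < cntF t ch))) (cntF t) true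
        = (PySem.List.sorted K (cntF t) true).filter (fun ch => decide (p < cntF t ch)) := by
      symm
      apply sorted_rev_filter
      intro a b ha hb
      have ha' : p < cntF t a := of_decide_eq_true ha
      have hb' : ¬ p < cntF t b := of_decide_eq_false hb
      omega
    rw [hE1, hE2, hE3]
    rfl
  have hdone : (true && !(mc.any (fun kv => kv.2 != 0)))
      = !(K.any (fun ch => decide (p < cntF t ch))) := by
    rw [Bool.true_and]
    congr 1
    rw [(PySem.List.sorted_perm _ _ _).any_eq]
    rw [hitems, List.any_map]
    apply PySem.List.any_congr_mem
    intro ch _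
    show ((kp ch) != 0) = decide (p < cntF t ch)
    have := cntF_nonneg t ch
    rw [hkpv, Bool.eq_iff_iff, bne_iff_ne, decide_eq_true_eq]
    omega
  rw [hdict, hemit, hdone]

theorem loop_eq (t : List Char) (m : Int)
    (hub : ∀ ch ∈ keysF t, cntF t ch ≤ m) (hex : ∃ ch ∈ keysF t, cntF t ch = m) :
    ∀ (fuel : Nat) (p : Int) (res : List Char), 0 ≤ p → p ≤ m → (m - p).toNat < fuel →
    rearrLoop fuel (DpF t p) res
      = res ++ (PySem.List.pyRange p m 1).flatMap (fun q => emitF t q) := by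
  intro fuel
  induction fuel with
  | zero => intro p res _ _ h; omega
  | succ f ih =>
    intro p res hp0 hpm hfuel
    simp only [rearrLoop]
    rw [pass_eq t p hp0 res]
    by_cases hlt : p < m
    · have hany : (keysF t).any (fun ch => decide (p < cntF t ch)) = true := by
        rcases hex with ⟨ch, hch, hcnt⟩
        exact List.any_eq_true.2 ⟨ch, hch, by simp [hcnt, hlt]⟩
      simp only [hany, Bool.not_true, if_false]
      rw [ih (p+1) (res ++ emitF t p) (by omega) (by omega) (by omega)]
      rw [PySem.List.pyRange_one_cons hlt]
      simp [List.flatMap_cons, List.append_assoc]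
    · have hpm' : p = m := le_antisymm hpm (not_lt.1 hlt)
      have hany : (keysF t).any (fun ch => decide (p < cntF t ch)) = false := by
        simp only [List.any_eq_false]
        intro ch hch
        simp [not_lt.2 (hpm' ▸ hub ch hch)]
      have hemitnil : emitF t p = [] := by
        unfold emitF
        apply List.filter_eq_nil_iff.2
        intro ch hch
        simp [not_lt.2 (hpm' ▸ hub ch ((PySem.List.mem_sorted _ _ _ _).1 hch))]
      simp only [hany, Bool.not_false, if_true]
      rw [hemitnil, PySem.List.pyRange_one_eq_nil (by omega)]
      simp

-- ======================= B-side machinery =======================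

-- k-th layer width and layer start offsets (partial sums)
def kW (t : List Char) (p : Nat) : Nat :=
  (keysF t).countP (fun ch => decide ((p : Int) < cntF t ch))

def psum (k : Nat → Nat) : Nat → Nat
  | 0 => 0
  | p+1 => psum k p + k p

theorem psum_mono (k : Nat → Nat) {p q : Nat} (h : p ≤ q) : psum k p ≤ psum k q := by
  induction q with
  | zero => simp_all [psum]
  | succ q ih =>
    rcases Nat.lt_or_ge p (q+1) with hlt | hge
    · exact le_trans (ih (by omega)) (by simp [psum])
    · have : p = q + 1 := by omega
      subst this; rfl

theorem psum_congr (k1 k2 : Nat → Nat) (M : Nat) (h : ∀ p, p < M → k1 p = k2 p) :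
    psum k1 M = psum k2 M := by
  induction M with
  | zero => rfl
  | succ M ih => simp only [psum]; rw [ih (fun p hp => h p (by omega)), h M (by omega)]

theorem psum_add (k1 k2 : Nat → Nat) (M : Nat) :
    psum (fun p => k1 p + k2 p) M = psum k1 M + psum k2 M := by
  induction M with
  | zero => rfl
  | succ M ih => simp only [psum]; omega

theorem psum_indicator (c : Int) (hc : 0 ≤ c) (M : Nat) :
    psum (fun p => if (p : Int) < c then 1 else 0) M = min c.toNat M := by
  induction M with
  | zero => simp [psum]
  | succ M ih =>
    simp only [psum, ih]
    by_cases h : (M : Int) < c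
    · rw [if_pos h]; omega
    · rw [if_neg h]; omega

-- two distinct (layer, rank) pairs give distinct output slots
theorem seg_inj (k : Nat → Nat) {p r p' r' : Nat} (hr : r < k p) (hr' : r' < k p')
    (h : psum k p + r = psum k p' + r') : p = p' ∧ r = r' := by
  rcases lt_trichotomy p p' with hlt | heq | hgt
  · have h1 : psum k (p+1) ≤ psum k p' := psum_mono k hlt
    have h2 : psum k (p+1) = psum k p + k p := rfl
    omega
  · subst heq; omega
  · have h1 : psum k (p'+1) ≤ psum k p := psum_mono k hgt
    have h2 : psum k (p'+1) = psum k p' + k p' := rfl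
    omega

theorem exists_seg (k : Nat → Nat) :
    ∀ (M j : Nat), j < psum k M → ∃ p, p < M ∧ psum k p ≤ j ∧ j < psum k p + k p := by
  intro M
  induction M with
  | zero => intro j h; simp [psum] at h
  | succ M ih =>
    intro j h
    by_cases hj : j < psum k M
    · rcases ih j hj with ⟨p, hp, h1, h2⟩
      exact ⟨p, by omega, h1, h2⟩
    · exact ⟨M, by omega, by omega, by simpa [psum] using h⟩

theorem length_flatMap_range {β : Type} (g : Nat → List β) (k : Nat → Nat) :
    ∀ (M : Nat), (∀ q, q < M → (g q).length = k q) →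
    ((List.range M).flatMap g).length = psum k M := by
  intro M
  induction M with
  | zero => intro _; rfl
  | succ M ih =>
    intro hg
    rw [List.range_succ, List.flatMap_append]
    simp only [List.length_append, List.flatMap_cons, List.flatMap_nil, List.append_nil]
    rw [ih (fun q hq => hg q (by omega)), hg M (by omega)]
    rfl

theorem getElem?_flatMap_range {β : Type} (g : Nat → List β) (k : Nat → Nat) :
    ∀ (M : Nat), (∀ q, q < M → (g q).length = k q) → ∀ (p j : Nat), p < M →
    psum k p ≤ j → j < psum k p + k p →
    ((List.range M).flatMap g)[j]? = (g p)[j - psum k p]? := by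
  intro M
  induction M with
  | zero => intro _ p j hp; omega
  | succ M ih =>
    intro hg p j hp h1 h2
    rw [List.range_succ, List.flatMap_append]
    simp only [List.flatMap_cons, List.flatMap_nil, List.append_nil]
    have hlen : ((List.range M).flatMap g).length = psum k M :=
      length_flatMap_range g k M (fun q hq => hg q (by omega))
    by_cases hpM : p < M
    · have hjM : j < psum k M := by
        have : psum k (p+1) ≤ psum k M := psum_mono k hpM
        have : psum k (p+1) = psum k p + k p := rfl
        omega
      rw [List.getElem?_append_left (by omega)]
      exact ih (fun q hq => hg q (by omega)) p j hpM h1 h2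
    · have hpe : p = M := by omega
      subst hpe
      rw [List.getElem?_append_right (by omega), hlen]

theorem length_foldl_set {α : Type} :
    ∀ (ws : List (Nat × α)) (init : List α),
    (ws.foldl (fun a w => a.set w.1 w.2) init).length = init.length := by
  intro ws
  induction ws with
  | nil => intro _; rfl
  | cons w ws ih => intro init; rw [List.foldl_cons, ih, List.length_set]

theorem getElem?_foldl_set_inv {α : Type} (j : Nat) (v : α) :
    ∀ (ws : List (Nat × α)) (init : List α), init[j]? = some v →
    (∀ w ∈ ws, w.1 = j → w.2 = v) →
    (ws.foldl (fun a w => a.set w.1 w.2) init)[j]? = some v := by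
  intro ws
  induction ws with
  | nil => intro init h _; exact h
  | cons w ws ih =>
    intro init h hval
    rw [List.foldl_cons]
    apply ih
    · by_cases hw : w.1 = j
      · have hj : j < init.length := by
          by_contra hc
          rw [List.getElem?_eq_none (by omega)] at h
          simp at h
        rw [hval w (by simp) hw, hw, List.getElem?_set_self hj]
      · rw [List.getElem?_set_ne hw, h]
    · exact fun w' hw' => hval w' (by simp [hw'])

theorem getElem?_foldl_set_hit {α : Type} (j : Nat) (v : α) :
    ∀ (ws : List (Nat × α)) (init : List α), j < init.length →
    (∃ w ∈ ws, w.1 = j) → (∀ w ∈ ws, w.1 = j → w.2 = v) →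
    (ws.foldl (fun a w => a.set w.1 w.2) init)[j]? = some v := by
  intro ws
  induction ws with
  | nil => intro init _ hex _; simp at hex
  | cons w ws ih =>
    intro init hj hex hval
    by_cases hw : w.1 = j
    · rw [List.foldl_cons]
      apply getElem?_foldl_set_inv
      · rw [hval w (by simp) hw, hw, List.getElem?_set_self hj]
      · exact fun w' hw' => hval w' (by simp [hw'])
    · rw [List.foldl_cons]
      apply ih
      · rwa [List.length_set]
      · rcases hex with ⟨w', hw', he⟩
        rcases List.mem_cons.1 hw' with rfl | hmem
        · exact absurd he hw
        · exact ⟨w', hmem, he⟩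
      · exact fun w' hw' => hval w' (by simp [hw'])

-- descending lists: the elements beating threshold p form a prefix
theorem desc_filter_eq_take {α : Type} (key : α → Int) (p : Int) :
    ∀ (l : List α), l.Pairwise (fun a b => key b ≤ key a) →
    l.filter (fun x => decide (p < key x))
      = l.take (l.countP (fun x => decide (p < key x))) := by
  intro l
  induction l with
  | nil => intro _; rfl
  | cons x l ih =>
    intro hpw
    rw [List.pairwise_cons] at hpw
    rw [List.filter_cons, List.countP_cons]
    by_cases hx : p < key x
    · rw [if_pos (by simpa using hx), if_pos (by simpa using hx), ih hpw.2]
      rfl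
    · rw [if_neg (by simpa using hx), if_neg (by simpa using hx)]
      have hz : l.countP (fun x => decide (p < key x)) = 0 := by
        rw [List.countP_eq_zero]
        intro a ha
        have := hpw.1 a ha
        simp only [decide_eq_true_eq]
        omega
      have hf : l.filter (fun x => decide (p < key x)) = [] := by
        rw [List.filter_eq_nil_iff]
        intro a ha
        have := hpw.1 a ha
        simp only [decide_eq_true_eq]
        omega
      simp [hz, hf]

theorem desc_getElem_iff {α : Type} (key : α → Int) (p : Int) :
    ∀ (l : List α), l.Pairwise (fun a b => key b ≤ key a) →
    ∀ (r : Nat) (hr : r < l.length),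
    (p < key l[r] ↔ r < l.countP (fun x => decide (p < key x))) := by
  intro l
  induction l with
  | nil => intro _ r hr; simp at hr
  | cons x l ih =>
    intro hpw r hr
    rw [List.pairwise_cons] at hpw
    rw [List.countP_cons]
    by_cases hx : p < key x
    · rw [if_pos (by simpa using hx)]
      cases r with
      | zero => simpa using hx
      | succ r =>
        simp only [List.getElem_cons_succ]
        rw [ih hpw.2 r (by simpa using hr)]
        omega
    · rw [if_neg (by simpa using hx)]
      have hz : l.countP (fun x => decide (p < key x)) = 0 := by
        rw [List.countP_eq_zero]
        intro a ha
        have := hpw.1 a ha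
        simp only [decide_eq_true_eq]
        omega
      rw [hz]
      constructor
      · intro hkey
        exfalso
        cases r with
        | zero => simp only [List.getElem_cons_zero] at hkey; omega
        | succ r =>
          simp only [List.getElem_cons_succ] at hkey
          have hrl : r < l.length := by simpa using hr
          have : l[r] ∈ l := List.getElem_mem hrl
          have := hpw.1 _ this
          omega
      · omega

theorem countP_ge_split {α : Type} (f : α → Int) (p : Int) (l : List α) :
    l.countP (fun x => decide (p ≤ f x))
      = l.countP (fun x => decide (f x = p)) + l.countP (fun x => decide (p + 1 ≤ f x)) := by
  induction l with
  | nil => rfl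
  | cons x l ih =>
    simp only [List.countP_cons, ih]
    by_cases h1 : f x = p
    · rw [if_pos (by simp [h1]), if_pos (by simp [h1]),
        if_neg (by simp only [decide_eq_true_eq]; omega)]
      omega
    · by_cases h2 : p ≤ f x
      · rw [if_pos (by simpa using h2), if_neg (by simpa using h1),
          if_pos (by simp only [decide_eq_true_eq]; omega)]
        omega
      · rw [if_neg (by simpa using h2), if_neg (by simpa using h1),
          if_neg (by simp only [decide_eq_true_eq]; omega)]
        omega

def histW (t : List Char) (c : Nat) : Nat :=
  (keysF t).countP (fun ch => decide (cntF t ch = (c : Int)))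

def kInv (t : List Char) (p : Nat) : Nat :=
  (keysF t).countP (fun ch => decide ((p : Int) ≤ cntF t ch))

theorem kInv_zero (t : List Char) : kInv t 0 = (keysF t).length := by
  unfold kInv
  rw [List.countP_eq_length]
  intro ch _
  simpa using cntF_nonneg t ch

theorem kInv_split (t : List Char) (p : Nat) :
    kInv t p = histW t p + kInv t (p+1) := by
  unfold kInv histW
  rw [countP_ge_split (cntF t) (p : Int) (keysF t)]
  have : (keysF t).countP (fun ch => decide ((p:Int) + 1 ≤ cntF t ch))
      = (keysF t).countP (fun ch => decide (((p+1 : Nat) : Int) ≤ cntF t ch)) := by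
    apply List.countP_congr
    intro ch _
    simp only [decide_eq_true_eq]
    push_cast
    omega
  rw [this]

theorem kInv_succ_eq_kW (t : List Char) (p : Nat) : kInv t (p+1) = kW t p := by
  unfold kInv kW
  apply List.countP_congr
  intro ch _
  simp only [decide_eq_true_eq]
  push_cast
  omega

theorem orderF_pairwise (t : List Char) :
    (orderF t).Pairwise (fun a b => cntF t b ≤ cntF t a) :=
  PySem.List.sorted_pairwise_rev _ _

theorem length_orderF (t : List Char) : (orderF t).length = (keysF t).length :=
  PySem.List.length_sorted _ _ _

theorem countP_orderF (t : List Char) (q : Char → Bool) :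
    (orderF t).countP q = (keysF t).countP q :=
  (PySem.List.sorted_perm (keysF t) (cntF t) true).countP_eq q

theorem emitF_eq_take (t : List Char) (q : Nat) :
    emitF t (q : Int) = (orderF t).take (kW t q) := by
  unfold emitF
  rw [desc_filter_eq_take (cntF t) (q : Int) (orderF t) (orderF_pairwise t)]
  rw [countP_orderF]
  rfl

theorem length_emitF (t : List Char) (q : Nat) :
    (emitF t (q : Int)).length = kW t q := by
  unfold emitF
  have : (List.filter (fun ch => decide ((q:Int) < cntF t ch)) (orderF t)).length
      = (orderF t).countP (fun ch => decide ((q:Int) < cntF t ch)) := by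
    induction (orderF t) with
    | nil => rfl
    | cons x l ih =>
      rw [List.filter_cons, List.countP_cons]
      by_cases hx : decide ((q:Int) < cntF t x) = true
      · simp [hx, ih]
      · simp only [Bool.not_eq_true] at hx
        simp [hx, ih]
  rw [this, countP_orderF]
  rfl

theorem kW_le_length (t : List Char) (q : Nat) : kW t q ≤ (orderF t).length := by
  rw [length_orderF]
  exact List.countP_le_length

theorem orderF_lt_iff (t : List Char) (q r : Nat) (hr : r < (orderF t).length) :
    ((q : Int) < cntF t (orderF t)[r] ↔ r < kW t q) := by
  rw [desc_getElem_iff (cntF t) (q : Int) (orderF t) (orderF_pairwise t) r hr]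
  rw [countP_orderF]
  rfl

theorem psum_countP {α : Type} (f : α → Int) (hf : ∀ ch, 0 ≤ f ch) :
    ∀ (ks : List α) (M : Nat), (∀ ch ∈ ks, f ch ≤ (M : Int)) →
    psum (fun p => ks.countP (fun ch => decide ((p : Int) < f ch))) M
      = (ks.map (fun ch => (f ch).toNat)).sum := by
  intro ks
  induction ks with
  | nil =>
    intro M _
    have : psum (fun p => List.countP (fun ch => decide ((p:Int) < f ch)) ([] : List α)) M
        = psum (fun _ => 0) M := psum_congr _ _ M (by simp)
    rw [this]
    induction M with
    | zero => rfl
    | succ M ihM => simpa [psum] using ihM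
  | cons x ks ih =>
    intro M hub
    have h1 : psum (fun p => List.countP (fun ch => decide ((p:Int) < f ch)) (x :: ks)) M
        = psum (fun p => List.countP (fun ch => decide ((p:Int) < f ch)) ks
            + if (p:Int) < f x then 1 else 0) M := by
      apply psum_congr
      intro p _
      rw [List.countP_cons]
      simp
    rw [h1, psum_add, ih M (fun ch hch => hub ch (by simp [hch])),
      psum_indicator (f x) (hf x) M]
    have : min (f x).toNat M = (f x).toNat := by
      have := hub x (by simp)
      omega
    rw [this, List.map_cons, List.sum_cons]
    omega

theorem sum_counts (t : List Char) :
    ((keysF t).map (fun ch => t.count ch)).sum = t.length := by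
  have hperm : (keysF t).Perm t.dedup := by
    rw [List.perm_ext_iff_of_nodup (keysF_nodup t) t.nodup_dedup]
    intro a
    rw [List.mem_dedup]
    exact PySem.Set.mem_ofList t a
  rw [(hperm.map (fun ch => t.count ch)).sum_eq]
  exact List.sum_map_count_dedup_eq_length t

theorem psum_kW (t : List Char) (M : Nat)
    (hub : ∀ ch ∈ keysF t, cntF t ch ≤ (M : Int)) :
    psum (kW t) M = t.length := by
  have h := psum_countP (cntF t) (cntF_nonneg t) (keysF t) M hub
  unfold kW
  rw [h]
  have : ((keysF t).map (fun ch => (cntF t ch).toNat))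
      = (keysF t).map (fun ch => t.count ch) := by
    apply List.map_congr_left
    intro ch _
    simp [cntF]
  rw [this, sum_counts]

-- the complete write list of B: for the rank-r char, one write per layer p < count
def wsOf (t : List Char) : List Char → Nat → List (Nat × List Char)
  | [], _ => []
  | ch :: rest, r =>
      (List.range (t.count ch)).map (fun p => (psum (kW t) p + r, ([ch] : List Char)))
        ++ wsOf t rest (r+1)

theorem mem_wsOf (t : List Char) :
    ∀ (xs : List Char) (r0 : Nat) (w : Nat × List Char),
    w ∈ wsOf t xs r0 ↔ ∃ (i p : Nat), ∃ hi : i < xs.length,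
      p < t.count xs[i] ∧ w = (psum (kW t) p + (r0 + i), ([xs[i]] : List Char)) := by
  intro xs
  induction xs with
  | nil => intro r0 w; simp [wsOf]
  | cons x xs ih =>
    intro r0 w
    simp only [wsOf, List.mem_append, List.mem_map, List.mem_range, ih]
    constructor
    · rintro (⟨p, hp, rfl⟩ | ⟨i, p, hi, hp, rfl⟩)
      · exact ⟨0, p, by simp, by simpa using hp, by simp⟩
      · refine ⟨i+1, p, by simpa using hi, by simpa using hp, ?_⟩
        simp only [List.getElem_cons_succ]
        congr 2
        omega
    · rintro ⟨i, p, hi, hp, rfl⟩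
      cases i with
      | zero => exact Or.inl ⟨p, by simpa using hp, by simp⟩
      | succ i =>
        refine Or.inr ⟨i, p, by simpa using hi, by simpa using hp, ?_⟩
        simp only [List.getElem_cons_succ]
        congr 2
        omega

theorem hist_fold_core (t : List Char) (M : Nat) :
    ∀ (ks : List Char) (hs : List Int), hs.length = M + 1 →
    (∀ ch ∈ ks, 1 ≤ t.count ch ∧ t.count ch ≤ M) →
    (ks.foldl (fun h ch => PySem.List.pySetD h ((PySem.Dict.counter t).getD ch 0)
        (PySem.List.pyGetD h ((PySem.Dict.counter t).getD ch 0) 0 + 1)) hs).length = M + 1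
    ∧ ∀ c : Nat, c ≤ M →
      (ks.foldl (fun h ch => PySem.List.pySetD h ((PySem.Dict.counter t).getD ch 0)
          (PySem.List.pyGetD h ((PySem.Dict.counter t).getD ch 0) 0 + 1)) hs).getD c 0
        = hs.getD c 0 + (ks.countP (fun ch => decide (cntF t ch = (c : Int))) : Int) := by
  intro ks
  induction ks with
  | nil => intro hs hlen _; exact ⟨hlen, fun c _ => by simp⟩
  | cons x ks ih =>
    intro hs hlen hb
    have hx := hb x (by simp)
    have hcx : (PySem.Dict.counter t).getD x 0 = ((t.count x : Nat) : Int) :=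
      PySem.Dict.getD_counter t x
    simp only [List.foldl_cons, hcx, PySem.List.pySetD_natCast, PySem.List.pyGetD_natCast]
    set hs' := hs.set (t.count x) (hs.getD (t.count x) 0 + 1) with hhs'
    have hlen' : hs'.length = M + 1 := by rw [hhs', List.length_set, hlen]
    rcases ih hs' hlen' (fun ch hch => hb ch (by simp [hch])) with ⟨h1, h2⟩
    refine ⟨h1, fun c hc => ?_⟩
    rw [h2 c hc]
    have hget : hs'.getD c 0
        = hs.getD c 0 + (if (decide (cntF t x = (c : Int))) = true then 1 else 0) := by
      rw [hhs', List.getD_eq_getElem?_getD, List.getD_eq_getElem?_getD]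
      by_cases hceq : t.count x = c
      · subst hceq
        rw [List.getElem?_set_self (by omega)]
        simp [cntF, List.getD_eq_getElem?_getD]
      · rw [List.getElem?_set_ne hceq]
        have : ¬ (cntF t x = (c : Int)) := by simp only [cntF]; omega
        simp [this]
    rw [hget, List.countP_cons]
    push_cast
    split_ifs <;> simp_all <;> ring

theorem altHist_getD (t : List Char) (M : Nat)
    (hks : ∀ ch ∈ keysF t, 1 ≤ t.count ch ∧ t.count ch ≤ M) (p : Nat) (hp : p ≤ M) :
    PySem.List.pyGetD (altHist (PySem.Dict.counter t) ((M : Nat) : Int)) (p : Int) 0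
      = (histW t p : Int) := by
  unfold altHist
  have hkeys : (PySem.Dict.counter t).keys = keysF t := PySem.Dict.keys_counter t
  have htn : ((M : Nat) : Int).toNat = M := by omega
  rw [hkeys, htn, PySem.List.pyGetD_natCast]
  rcases hist_fold_core t M (keysF t) (List.replicate (M+1) (0:Int))
      (by simp) hks with ⟨_, h2⟩
  rw [h2 p hp, List.getD_replicate _ (by omega)]
  simp [histW]

theorem altOffs_eval (t : List Char) (M : Nat) (hl : List Int)
    (hhv : ∀ p : Nat, p < M → PySem.List.pyGetD hl (p : Int) 0 = (histW t p : Int)) :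
    ∀ P : Nat, P ≤ M →
    (PySem.List.pyRange 0 (P : Int) 1).foldl
      (fun (st : List Int × Int × Int) p =>
        let k := st.2.2 - PySem.List.pyGetD hl p 0
        (PySem.List.pySetD st.1 p st.2.1, st.2.1 + k, k))
      (List.replicate M (0 : Int), 0, ((keysF t).length : Int))
    = ((List.range M).map (fun q => if q < P then (psum (kW t) q : Int) else 0),
       (psum (kW t) P : Int), (kInv t P : Int)) := by
  intro P
  induction P with
  | zero =>
    intro _
    rw [PySem.List.pyRange_one_eq_nil (by omega)]
    simp only [List.foldl_nil]
    refine Prod.ext ?_ (Prod.ext ?_ ?_)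
    · apply List.ext_getElem
      · simp
      · intro i h1 h2
        simp [List.getElem_replicate]
    · simp [psum]
    · simp [kInv_zero]
  | succ P ihP =>
    intro hPM
    have hc : ((P+1 : Nat) : Int) = (P : Int) + 1 := by push_cast; ring
    rw [hc, PySem.List.pyRange_one_succ_right (by omega), List.foldl_append,
      ihP (by omega)]
    simp only [List.foldl_cons, List.foldl_nil]
    have hPltM : P < M := by omega
    rw [hhv P hPltM]
    have hksplit : (kInv t P : Int) - (histW t P : Int) = (kInv t (P+1) : Int) := by
      have := kInv_split t P
      push_cast [this]
      ring
    have hkw : kInv t (P+1) = kW t P := kInv_succ_eq_kW t P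
    refine Prod.ext ?_ (Prod.ext ?_ ?_)
    · show PySem.List.pySetD _ (P : Int) _ = _
      rw [PySem.List.pySetD_natCast]
      apply List.ext_getElem
      · simp
      · intro i h1 h2
        rw [List.getElem_set]
        simp only [List.getElem_map, List.getElem_range]
        have hiM : i < M := by simpa using h2
        by_cases hiP : P = i
        · subst hiP
          rw [if_pos rfl, if_pos (by omega)]
        · rw [if_neg hiP]
          by_cases hilt : i < P
          · rw [if_pos hilt, if_pos (by omega)]
          · rw [if_neg hilt, if_neg (by omega)]
    · show (psum (kW t) P : Int) + ((kInv t P : Int) - (histW t P : Int)) = _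
      rw [hksplit, hkw]
      have : psum (kW t) (P+1) = psum (kW t) P + kW t P := rfl
      push_cast [this]
      ring
    · show (kInv t P : Int) - (histW t P : Int) = _
      rw [hksplit]

theorem writes_fold_core (t : List Char) (M : Nat) (offsL : List Int)
    (hoffs : ∀ p : Nat, p < M →
      PySem.List.pyGetD offsL (p : Int) 0 = (psum (kW t) p : Int)) :
    ∀ (xs : List Char) (r0 : Nat) (init : List (List Char)),
    (∀ ch ∈ xs, t.count ch ≤ M) →
    (PySem.List.enumerate xs (r0 : Int)).foldl
      (fun res rch =>
        (PySem.List.pyRange 0 ((PySem.Dict.counter t).getD rch.2 0) 1).foldl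
          (fun res p =>
            PySem.List.pySetD res (PySem.List.pyGetD offsL p 0 + rch.1) [rch.2])
          res)
      init
    = (wsOf t xs r0).foldl (fun a w => a.set w.1 w.2) init := by
  intro xs
  induction xs with
  | nil => intro r0 init _; rfl
  | cons x xs ih =>
    intro r0 init hb
    rw [PySem.List.enumerate_cons, List.foldl_cons]
    have hcx : (PySem.Dict.counter t).getD x 0 = ((t.count x : Nat) : Int) :=
      PySem.Dict.getD_counter t x
    have hinner :
        (PySem.List.pyRange 0 ((PySem.Dict.counter t).getD x 0) 1).foldl
          (fun res p =>
            PySem.List.pySetD res (PySem.List.pyGetD offsL p 0 + ((r0 : Int), x).1)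
              [((r0 : Int), x).2]) init
        = ((List.range (t.count x)).map
            (fun p => (psum (kW t) p + r0, ([x] : List Char)))).foldl
            (fun a w => a.set w.1 w.2) init := by
      rw [hcx, PySem.List.pyRange_zero_natCast, List.foldl_map, List.foldl_map]
      apply PySem.List.foldl_congr_mem
      intro acc p hp
      have hpM : p < M := by
        have := hb x (by simp)
        have := List.mem_range.1 hp
        omega
      show PySem.List.pySetD acc (PySem.List.pyGetD offsL (p : Int) 0 + (r0 : Int)) [x]
          = acc.set (psum (kW t) p + r0) [x]
      rw [hoffs p hpM]
      have : (psum (kW t) p : Int) + (r0 : Int) = ((psum (kW t) p + r0 : Nat) : Int) := by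
        push_cast; ring
      rw [this, PySem.List.pySetD_natCast]
    rw [hinner]
    show _ = (wsOf t (x :: xs) r0).foldl (fun a w => a.set w.1 w.2) init
    rw [wsOf, List.foldl_append]
    have hc : (r0 : Int) + 1 = ((r0 + 1 : Nat) : Int) := by push_cast; ring
    rw [hc]
    exact ih (r0+1) _ (fun ch hch => hb ch (by simp [hch]))

theorem flatten_map_singleton {β : Type} : ∀ (l : List β),
    (l.map (fun b => ([b] : List β))).flatten = l := by
  intro l
  induction l with
  | nil => rfl
  | cons x l ih => simp [ih]

theorem flatten_flatMap_singleton {β γ : Type} (g : γ → List β) : ∀ (l : List γ),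
    (l.flatMap (fun x => (g x).map (fun b => ([b] : List β)))).flatten = l.flatMap g := by
  intro l
  induction l with
  | nil => rfl
  | cons x l ih =>
    rw [List.flatMap_cons, List.flatMap_cons, List.flatten_append, ih,
      flatten_map_singleton]

theorem res_eq (t : List Char) (M : Nat)
    (hub : ∀ ch ∈ keysF t, cntF t ch ≤ (M : Int)) :
    ((wsOf t (orderF t) 0).foldl (fun a w => a.set w.1 w.2)
        (List.replicate t.length ([] : List Char))).flatten
      = (List.range M).flatMap (fun q : Nat => emitF t (q : Int)) := by
  have hn : psum (kW t) M = t.length := psum_kW t M hub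
  have hlenE : ∀ q, q < M → ((emitF t (q:Int)).map (fun c => ([c] : List Char))).length
      = kW t q := by
    intro q _
    rw [List.length_map, length_emitF]
  have hcount_iff : ∀ (p r : Nat) (hr : r < (orderF t).length),
      (p < t.count ((orderF t)[r]'hr) ↔ r < kW t p) := by
    intro p r hr
    rw [← orderF_lt_iff t p r hr]
    simp only [cntF]
    omega
  have hmain : (wsOf t (orderF t) 0).foldl (fun a w => a.set w.1 w.2)
        (List.replicate t.length ([] : List Char))
      = (List.range M).flatMap (fun q : Nat => (emitF t (q:Int)).map (fun c => ([c] : List Char))) := by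
    apply List.ext_getElem?
    intro j
    have hlenL : ((wsOf t (orderF t) 0).foldl (fun a w => a.set w.1 w.2)
        (List.replicate t.length ([] : List Char))).length = t.length := by
      rw [length_foldl_set, List.length_replicate]
    have hlenR : ((List.range M).flatMap
        (fun q : Nat => (emitF t (q:Int)).map (fun c => ([c] : List Char)))).length = t.length := by
      rw [length_flatMap_range _ (kW t) M hlenE, hn]
    by_cases hj : j < t.length
    · rcases exists_seg (kW t) M j (by omega) with ⟨p, hpM, h1, h2⟩
      set r := j - psum (kW t) p with hr
      have hrk : r < kW t p := by omega
      have hrlen : r < (orderF t).length := lt_of_lt_of_le hrk (kW_le_length t p)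
      -- right side
      have hR : ((List.range M).flatMap
          (fun q : Nat => (emitF t (q:Int)).map (fun c => ([c] : List Char))))[j]?
          = some [(orderF t)[r]] := by
        rw [getElem?_flatMap_range _ (kW t) M hlenE p j hpM h1 h2]
        rw [← hr, List.getElem?_map, emitF_eq_take, List.getElem?_take]
        rw [if_pos hrk, List.getElem?_eq_getElem hrlen]
        rfl
      -- left side
      have hL : ((wsOf t (orderF t) 0).foldl (fun a w => a.set w.1 w.2)
          (List.replicate t.length ([] : List Char)))[j]?
          = some [(orderF t)[r]] := by
        apply getElem?_foldl_set_hit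
        · rw [List.length_replicate]; omega
        · refine ⟨(psum (kW t) p + (0 + r), [(orderF t)[r]]), ?_, by omega⟩
          rw [mem_wsOf]
          exact ⟨r, p, hrlen, (hcount_iff p r hrlen).2 hrk, by simp⟩
        · intro w hw he
          rw [mem_wsOf] at hw
          rcases hw with ⟨i, p', hi, hp', rfl⟩
          have hik : i < kW t p' := (hcount_iff p' i hi).1 hp'
          have heq : psum (kW t) p' + i = psum (kW t) p + r := by omega
          rcases seg_inj (kW t) hik hrk heq with ⟨hpe, hie⟩
          subst hpe; subst hie
          rfl
      rw [hL, hR]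
    · rw [List.getElem?_eq_none (by omega), List.getElem?_eq_none (by omega)]
  rw [hmain, flatten_flatMap_singleton]

-- ===== VERDICT (by name: the statements are the Claim_ definitions above) =====
theorem rearr_spec : Claim_equal_rearr := by
  unfold Claim_equal_rearr
  intro s _ hpre
  unfold Spec_rearr
  have hA_eq : rearr s =
      (match PySem.List.pyGet? (PySem.List.sorted (PySem.Dict.counter s.toList).items
          (fun kv => kv.2) true) 0 with
      | none => none
      | some kv0 =>
        if kv0.2 > PySem.Int.floordiv (s.toList.length : Int) 2 + 1 then none
        else some (String.ofList
          (rearrLoop (s.toList.length + 1) (PySem.Dict.counter s.toList) []))) := rfl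
  have hB_eq : rearr_alt s =
      (if (PySem.Dict.counter s.toList).items.isEmpty then some (String.ofList [])
       else
        match PySem.List.pyGet? (PySem.List.sorted (PySem.Dict.counter s.toList).keys
            (fun ch => (PySem.Dict.counter s.toList).getD ch 0) true) 0 with
        | none => none
        | some ch0 =>
          if (PySem.Dict.counter s.toList).getD ch0 0
              > PySem.Int.floordiv (s.toList.length : Int) 2 + 1 then none
          else
            some (String.ofList
              ((altWrites (PySem.Dict.counter s.toList)
                (altOffs
                  (altHist (PySem.Dict.counter s.toList)
                    ((PySem.Dict.counter s.toList).getD ch0 0))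
                  ((PySem.Dict.counter s.toList).getD ch0 0)
                  ((PySem.List.sorted (PySem.Dict.counter s.toList).keys
                      (fun ch => (PySem.Dict.counter s.toList).getD ch 0) true).length : Int)).1
                (PySem.List.sorted (PySem.Dict.counter s.toList).keys
                  (fun ch => (PySem.Dict.counter s.toList).getD ch 0) true)
                s.toList.length).flatten))) := rfl
  rw [hA_eq, hB_eq]
  set t := s.toList with ht
  have htne : t ≠ [] := by
    intro hnil
    exact hpre (by rwa [← String.toList_eq_nil_iff])
  have hKne : keysF t ≠ [] := by
    intro hK
    cases htl : t with
    | nil => exact htne htl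
    | cons a t' =>
      have hmem : a ∈ keysF t := (PySem.Set.mem_ofList _ _).2 (by rw [htl]; simp)
      rw [hK] at hmem
      simp at hmem
  set c := PySem.Dict.counter t with hc
  have hckeys : c.keys = keysF t := PySem.Dict.keys_counter t
  have hcitems : c.items = (keysF t).map (fun ch => (ch, cntF t ch)) :=
    PySem.Dict.items_counter t
  have hgetD : ∀ ch, c.getD ch 0 = cntF t ch := fun ch => PySem.Dict.getD_counter t ch
  have hfun : (fun ch => c.getD ch 0) = cntF t := funext hgetD
  have hitemsne : c.items ≠ [] := by
    rw [hcitems]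
    simp [hKne]
  obtain ⟨kv0, tlA, hS⟩ : ∃ kv0 tlA,
      PySem.List.sorted c.items (fun kv => kv.2) true = kv0 :: tlA := by
    cases hS : PySem.List.sorted c.items (fun kv => kv.2) true with
    | nil => exact absurd ((PySem.List.sorted_eq_nil_iff _ _ _).1 hS) hitemsne
    | cons kv0 tlA => exact ⟨kv0, tlA, rfl⟩
  have horder : PySem.List.sorted c.keys (fun ch => c.getD ch 0) true = orderF t := by
    rw [hckeys, hfun]; rfl
  obtain ⟨ch0, tlB, hO⟩ : ∃ ch0 tlB, orderF t = ch0 :: tlB := by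
    cases hO : orderF t with
    | nil => exact absurd ((PySem.List.sorted_eq_nil_iff _ _ _).1 hO) hKne
    | cons ch0 tlB => exact ⟨ch0, tlB, rfl⟩
  have hch0K : ch0 ∈ keysF t := by
    have : ch0 ∈ orderF t := by rw [hO]; simp
    exact (PySem.List.mem_sorted _ _ _ _).1 this
  have hub : ∀ y ∈ keysF t, cntF t y ≤ cntF t ch0 :=
    PySem.List.key_head_sorted_rev_ge (keysF t) (cntF t) hO
  have hmax : kv0.2 = cntF t ch0 := by
    have hA : ∀ y ∈ c.items, y.2 ≤ kv0.2 :=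
      PySem.List.key_head_sorted_rev_ge c.items (fun kv => kv.2) hS
    have hkv0mem : kv0 ∈ c.items := by
      have : kv0 ∈ PySem.List.sorted c.items (fun kv => kv.2) true := by rw [hS]; simp
      exact (PySem.List.mem_sorted _ _ _ _).1 this
    have h1 : kv0.2 ≤ cntF t ch0 := by
      rw [hcitems] at hkv0mem
      rcases List.mem_map.1 hkv0mem with ⟨ch', hch', heq⟩
      have heq2 : kv0.2 = cntF t ch' := by rw [← heq]
      rw [heq2]
      exact hub ch' hch'
    have h2 : cntF t ch0 ≤ kv0.2 := by
      exact hA (ch0, cntF t ch0) (by rw [hcitems]; exact List.mem_map_of_mem hch0K)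
    omega
  rw [hS, horder, hO]
  have hne : ¬ (c.items.isEmpty = true) := by simp [hitemsne]
  rw [if_neg hne]
  simp only [pysem, List.getElem?_cons_zero]
  rw [hmax, hgetD ch0]
  by_cases hthr : cntF t ch0 > PySem.Int.floordiv ((t.length : Nat) : Int) 2 + 1
  · rw [if_pos hthr, if_pos hthr]
  · rw [if_neg hthr, if_neg hthr]
    rw [← hO]
    simp only [Option.some.injEq]
    congr 1
    set M := t.count ch0 with hM
    have hm : cntF t ch0 = (M : Int) := by simp [cntF, hM]
    have hubM : ∀ ch ∈ keysF t, cntF t ch ≤ (M : Int) := by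
      intro ch hch
      exact le_trans (hub ch hch) (le_of_eq hm)
    -- A's value: the pass loop produces the layer-major concatenation
    have hc0 : c = DpF t 0 := by
      apply PySem.Dict.ext
      rw [hcitems, DpF_items]
      apply List.map_congr_left
      intro ch _
      have := cntF_nonneg t ch
      simp only [Prod.mk.injEq, true_and]
      omega
    have hfuel : ((cntF t ch0 : Int) - 0).toNat < t.length + 1 := by
      have h1 : t.count ch0 ≤ t.length := List.count_le_length
      unfold cntF
      omega
    have hA_val : rearrLoop (t.length + 1) c []
        = (List.range M).flatMap (fun q : Nat => emitF t (q : Int)) := by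
      rw [hc0, loop_eq t (cntF t ch0) hub ⟨ch0, hch0K, rfl⟩ (t.length + 1) 0 []
        le_rfl (cntF_nonneg t ch0) hfuel]
      rw [List.nil_append, hm, PySem.List.pyRange_zero_natCast, List.flatMap_map]
    rw [hA_val]
    -- B's value: histogram, then offsets, then char-major writes
    have hks : ∀ ch ∈ keysF t, 1 ≤ t.count ch ∧ t.count ch ≤ M := by
      intro ch hch
      have hmem : ch ∈ t := (PySem.Set.mem_ofList t ch).1 hch
      have h1 : 0 < t.count ch := List.count_pos_iff.2 hmem
      have h2 := hubM ch hch
      simp only [cntF] at h2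
      omega
    have hhv : ∀ p : Nat, p < M →
        PySem.List.pyGetD (altHist c ((M : Nat) : Int)) (p : Int) 0 = (histW t p : Int) := by
      intro p hp
      rw [hc]
      exact altHist_getD t M hks p (by omega)
    have hoffs_val : (altOffs (altHist c ((M : Nat) : Int)) ((M : Nat) : Int)
          ((orderF t).length : Int)).1
        = (List.range M).map (fun q => if q < M then (psum (kW t) q : Int) else 0) := by
      unfold altOffs
      have htn : ((M : Nat) : Int).toNat = M := by omega
      rw [htn, length_orderF t, altOffs_eval t M _ hhv M le_rfl]
    have hoffs : ∀ p : Nat, p < M →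
        PySem.List.pyGetD
          ((List.range M).map (fun q => if q < M then (psum (kW t) q : Int) else 0))
          (p : Int) 0
        = (psum (kW t) p : Int) := by
      intro p hp
      rw [PySem.List.pyGetD_natCast, List.getD_eq_getElem?_getD, List.getElem?_map,
        List.getElem?_range hp]
      simp [hp]
    have hbound : ∀ ch ∈ orderF t, t.count ch ≤ M := by
      intro ch hch
      exact (hks ch ((PySem.List.mem_sorted _ _ _ _).1 hch)).2
    rw [hm, hoffs_val]
    unfold altWrites
    have hw := writes_fold_core t M _ hoffs (orderF t) 0
      (List.replicate t.length ([] : List Char)) hbound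
    simp only [Nat.cast_zero] at hw
    rw [← hc] at hw
    rw [hw]
    exact (res_eq t M hubM).symm
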